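-- pv_equiv track=rewrite | github.com/oriolLanuza/2048 | game2048.py | move_row_right
-- ===== SOURCE A (Python) =====
-- def move_row_right(row):
--     updated_row = []
--     for value in row:
--         if value == 0:
--             updated_row.insert(0,0)
--         else:
--             updated_row.append(value)
--     return updated_row
-- ===== SOURCE B (Python) =====
-- def move_row_right(row):
--     kept = [v for v in row if v != 0]
--     return [0] * (len(row) - len(kept)) + kept
-- ===== Notes on version B (the rewrite author's own statement) =====
-- stated objective: simpler
-- what changed: Replaces A's single loop that branches between front-insert and append with a two-phase decomposition: filter the nonzero survivors in order, then prepend a bulk block of zeros whose count is the length difference.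
import Mathlib
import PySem

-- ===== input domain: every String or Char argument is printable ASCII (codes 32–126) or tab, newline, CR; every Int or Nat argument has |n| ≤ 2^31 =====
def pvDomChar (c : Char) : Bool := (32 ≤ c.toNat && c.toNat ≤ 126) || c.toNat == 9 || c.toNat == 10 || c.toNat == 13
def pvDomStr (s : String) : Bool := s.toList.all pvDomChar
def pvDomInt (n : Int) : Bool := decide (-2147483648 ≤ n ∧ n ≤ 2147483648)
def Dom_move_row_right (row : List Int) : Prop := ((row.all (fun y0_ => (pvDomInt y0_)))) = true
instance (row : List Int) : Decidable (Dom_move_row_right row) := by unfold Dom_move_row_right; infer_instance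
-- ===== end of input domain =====

-- B replaces A's single branching loop (front-insert zero / append nonzero) with a
-- two-phase decomposition: filter the nonzero survivors, then pad with leading zeros (objective: simpler).

-- ===== PORT A =====
def move_row_right (row : List Int) : List Int :=
  row.foldl (fun updated_row value =>
    if value == 0 then 0 :: updated_row else updated_row ++ [value]) []

-- ===== PORT B =====
def move_row_right_alt (row : List Int) : List Int :=
  let kept := row.filter (fun v => v != 0)
  List.replicate (row.length - kept.length) 0 ++ kept

-- ===== PRECONDITION & SPEC =====
def Spec_move_row_right (row : List Int) (out : List Int) : Prop := out = move_row_right_alt row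
instance (row : List Int) (out : List Int) : Decidable (Spec_move_row_right row out) := by unfold Spec_move_row_right; infer_instance

-- ===== CLAIM (what is proved, stated in full; the proofs are below) =====
def Claim_equal_move_row_right : Prop := ∀ (row : List Int), Dom_move_row_right row → Spec_move_row_right row (move_row_right row)

-- ===== LEMMAS AND PROOFS =====

-- loop invariant for A's fold: zeros collect before the accumulator, nonzeros after it
lemma fold_inv (row acc : List Int) :
    row.foldl (fun updated_row value =>
      if value == 0 then 0 :: updated_row else updated_row ++ [value]) acc
    = List.replicate (row.countP (fun v => v == 0)) 0 ++ acc
        ++ row.filter (fun v => v != 0) := by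
  induction row generalizing acc with
  | nil => simp
  | cons v row ih =>
    rw [List.foldl_cons, ih]
    by_cases h : v = 0
    · subst h
      simp [List.replicate_succ', List.append_assoc]
    · simp [h, List.append_assoc]

-- B's zero count equals A's: removed elements are exactly the zeros
lemma count_zeros (row : List Int) :
    row.length - (row.filter (fun v => v != 0)).length
    = row.countP (fun v => v == 0) := by
  induction row with
  | nil => rfl
  | cons v row ih =>
    have hle := List.length_filter_le (fun v => v != 0) row
    by_cases h : v = 0 <;> simp [h] <;> omega

-- ===== VERDICT (by name: the statement is the Claim_ definition above) =====
theorem move_row_right_spec : Claim_equal_move_row_right := by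
  intro row _
  unfold Spec_move_row_right move_row_right move_row_right_alt
  rw [fold_inv]
  simp [count_zeros]
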